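-- pv_equiv track=rewrite | github.com/chinaPancake/codeforces | challenging_valleys.py | state_f
-- ===== SOURCE A (Python) =====
-- def state_f(arr):
--     ans = 'dol'
--     for l,n in zip(arr,arr[1:]):
--         if ans == 'dol':
--             if l<n:
--                 ans = 'gora'
--
--         elif ans =='gora':
--             if l>n:
--                 ans = 'dol'
--                 return 'NO'
--
--     return 'YES'
-- ===== SOURCE B (Python) =====
-- def state_f(arr):
--     # Reduce to the sequence of strict adjacent changes (+1 rise, -1 fall, ties dropped);
--     # the array is a valley exactly when all falls precede all rises, i.e. the sign list is sorted.
--     signs = [(a < b) - (a > b) for a, b in zip(arr, arr[1:]) if a != b]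
--     return 'YES' if signs == sorted(signs) else 'NO'
-- ===== Notes on version B (the rewrite author's own statement) =====
-- stated objective: alternative
-- what changed: Replaced A's forward string-state machine with a declarative reduction: B extracts the list of strict adjacent change signs (+1 rise, -1 fall, ties dropped) and answers YES iff that sign list equals its sorted version (all falls before all rises).
import Mathlib
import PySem

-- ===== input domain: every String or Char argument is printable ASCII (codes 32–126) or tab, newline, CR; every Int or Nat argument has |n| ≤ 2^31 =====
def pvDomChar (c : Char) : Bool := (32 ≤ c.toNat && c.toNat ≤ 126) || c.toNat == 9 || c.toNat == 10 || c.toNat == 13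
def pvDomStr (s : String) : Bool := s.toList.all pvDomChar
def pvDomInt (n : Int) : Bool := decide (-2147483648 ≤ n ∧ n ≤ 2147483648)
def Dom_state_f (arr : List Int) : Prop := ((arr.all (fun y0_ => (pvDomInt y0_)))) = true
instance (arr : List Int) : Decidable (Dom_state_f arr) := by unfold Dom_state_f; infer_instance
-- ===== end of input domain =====

-- B replaces A's string-state machine by an extract-and-sort check: it builds the list of
-- strict adjacent change signs (+1 rise, -1 fall) and answers "YES" iff that list is sorted;
-- objective: alternative (declarative characterisation instead of a state machine).


-- ===== PORT A =====
-- the for-loop over zip(arr, arr[1:]) with the string state `ans` and the early return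
def state_f_loop (ans : String) : List (Int × Int) → String
  | [] => "YES"
  | (l, n) :: rest =>
    if ans == "dol" then
      if l < n then state_f_loop "gora" rest else state_f_loop ans rest
    else if ans == "gora" then
      if l > n then "NO" else state_f_loop ans rest
    else state_f_loop ans rest

-- arr[1:] is arr.drop 1 (exact: non-negative start slice)
def state_f (arr : List Int) : String := state_f_loop "dol" (arr.zip (arr.drop 1))

-- ===== PORT B =====
-- the comprehension [(a < b) - (a > b) for a, b in zip(arr, arr[1:]) if a != b]
def altSigns (arr : List Int) : List Int :=
  (arr.zip (arr.drop 1)).filterMap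
    (fun p => if p.1 ≠ p.2
              then some ((if p.1 < p.2 then (1 : Int) else 0) - (if p.1 > p.2 then (1 : Int) else 0))
              else none)

-- 'YES' if signs == sorted(signs) else 'NO'
def state_f_alt (arr : List Int) : String :=
  if altSigns arr = PySem.List.sorted (altSigns arr) (fun x => x) false then "YES" else "NO"

-- ===== PRECONDITION & SPEC =====
def Spec_state_f (arr : List Int) (out : String) : Prop := out = state_f_alt arr
instance (arr : List Int) (out : String) : Decidable (Spec_state_f arr out) := by unfold Spec_state_f; infer_instance

-- ===== CLAIM =====
def Claim_equal_state_f : Prop := ∀ (arr : List Int), Dom_state_f arr → Spec_state_f arr (state_f arr)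

-- ===== LEMMAS AND PROOFS =====
-- unfolding equations for altSigns on a cons-cons list
theorem altSigns_eq (a b : Int) (rest : List Int) :
    altSigns (a :: b :: rest) =
      (if a < b then 1 :: altSigns (b :: rest)
       else if a > b then (-1) :: altSigns (b :: rest)
       else altSigns (b :: rest)) := by
  rcases lt_trichotomy a b with h | h | h
  · have h1 : a ≠ b := h.ne
    have h2 : ¬ b < a := by omega
    simp [altSigns, h, h1, h2]
  · subst h; simp [altSigns]
  · have h1 : a ≠ b := by omega
    have h2 : ¬ a < b := by omega
    simp [altSigns, h, h1, h2]

-- every sign is 1 or -1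
theorem altSigns_mem (arr : List Int) : ∀ x ∈ altSigns arr, x = 1 ∨ x = -1 := by
  induction arr with
  | nil => simp [altSigns]
  | cons a tl ih =>
    cases tl with
    | nil => simp [altSigns]
    | cons b rest =>
      intro x hx
      rw [altSigns_eq] at hx
      rcases lt_trichotomy a b with h | h | h
      · rw [if_pos h] at hx
        rcases List.mem_cons.mp hx with h1 | h1
        · exact Or.inl h1
        · exact ih x h1
      · rw [if_neg (by omega), if_neg (by omega)] at hx
        exact ih x hx
      · rw [if_neg (by omega), if_pos (by omega)] at hx
        rcases List.mem_cons.mp hx with h1 | h1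
        · exact Or.inr h1
        · exact ih x h1

-- in state "gora" A answers "NO" exactly when some fall remains
theorem loop_gora (xs : List Int) :
    state_f_loop "gora" (xs.zip (xs.drop 1)) =
      (if (-1 : Int) ∈ altSigns xs then "NO" else "YES") := by
  induction xs with
  | nil => simp [state_f_loop, altSigns]
  | cons a tl ih =>
    cases tl with
    | nil => simp [state_f_loop, altSigns]
    | cons b rest =>
      rcases lt_trichotomy a b with h | h | h
      · simp only [List.drop, List.zip_cons_cons, altSigns_eq, if_pos h]
        have hng : ¬ a > b := by omega
        simpa [state_f_loop, hng] using ih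
      · subst h
        simp only [List.drop, List.zip_cons_cons, altSigns_eq,
          if_neg (lt_irrefl a)]
        simpa [state_f_loop] using ih
      · simp only [List.drop, List.zip_cons_cons, altSigns_eq,
          if_neg (by omega : ¬ a < b), if_pos h]
        simp [state_f_loop, h]

-- in state "dol" A answers "YES" exactly when the sign list is pairwise ≤
theorem loop_dol (xs : List Int) :
    state_f_loop "dol" (xs.zip (xs.drop 1)) =
      (if (altSigns xs).Pairwise (· ≤ ·) then "YES" else "NO") := by
  induction xs with
  | nil => simp [state_f_loop, altSigns]
  | cons a tl ih =>
    cases tl with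
    | nil => simp [state_f_loop, altSigns]
    | cons b rest =>
      rcases lt_trichotomy a b with h | h | h
      · -- rise: enter "gora"; Pairwise (1 :: s) ↔ -1 ∉ s (elements are ±1)
        simp only [List.drop, List.zip_cons_cons, altSigns_eq, if_pos h]
        have hstep : state_f_loop "dol" ((a, b) :: ((b :: rest).zip rest)) =
            state_f_loop "gora" ((b :: rest).zip rest) := by
          simp [state_f_loop, h]
        rw [hstep]
        have := loop_gora (b :: rest)
        simp only [List.drop] at this
        rw [this]
        by_cases hm : (-1 : Int) ∈ altSigns (b :: rest)
        · rw [if_pos hm, if_neg]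
          intro hp
          have := (List.pairwise_cons.mp hp).1 _ hm
          omega
        · rw [if_neg hm, if_pos]
          refine List.pairwise_cons.mpr ⟨?_, ?_⟩
          · intro x hx
            rcases altSigns_mem _ x hx with h1 | h1
            · omega
            · exact absurd (h1 ▸ hx) hm
          · refine List.pairwise_of_forall_mem_list ?_
            intro x hx y hy
            rcases altSigns_mem _ y hy with h2 | h2
            · rcases altSigns_mem _ x hx with h1 | h1 <;> omega
            · exact absurd (h2 ▸ hy) hm
      · -- tie: nothing changes
        subst h
        simp only [List.drop, List.zip_cons_cons, altSigns_eq,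
          if_neg (lt_irrefl a)]
        have hstep : state_f_loop "dol" ((a, a) :: ((a :: rest).zip rest)) =
            state_f_loop "dol" ((a :: rest).zip rest) := by
          simp [state_f_loop]
        rw [hstep]
        simpa using ih
      · -- fall in "dol": stays; Pairwise ((-1) :: s) ↔ Pairwise s (elements ≥ -1)
        simp only [List.drop, List.zip_cons_cons, altSigns_eq,
          if_neg (by omega : ¬ a < b), if_pos h]
        have hnl : ¬ a < b := by omega
        have hstep : state_f_loop "dol" ((a, b) :: ((b :: rest).zip rest)) =
            state_f_loop "dol" ((b :: rest).zip rest) := by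
          simp [state_f_loop, hnl]
        rw [hstep]
        simp only [List.drop] at ih
        rw [ih]
        by_cases hp : (altSigns (b :: rest)).Pairwise (· ≤ ·)
        · rw [if_pos hp, if_pos]
          refine List.pairwise_cons.mpr ⟨?_, hp⟩
          intro x hx
          rcases altSigns_mem _ x hx with h1 | h1 <;> omega
        · rw [if_neg hp, if_neg]
          intro hc
          exact hp (List.pairwise_cons.mp hc).2

-- s = sorted(s) ↔ s is pairwise ≤
theorem sorted_iff (s : List Int) :
    s = PySem.List.sorted s (fun x => x) false ↔ s.Pairwise (· ≤ ·) := by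
  constructor
  · intro h
    have hp := PySem.List.sorted_pairwise (xs := s) (key := fun x => x)
    rw [← h] at hp
    simpa using hp
  · intro h
    exact Eq.symm (PySem.List.sorted_eq_self_of_pairwise s (fun x => x) (by simpa using h))

-- ===== VERDICT =====
theorem state_f_spec : Claim_equal_state_f := by
  intro arr _
  unfold Spec_state_f state_f state_f_alt
  rw [loop_dol]
  by_cases hp : (altSigns arr).Pairwise (· ≤ ·)
  · rw [if_pos hp, if_pos ((sorted_iff _).mpr hp)]
  · rw [if_neg hp, if_neg (fun h => hp ((sorted_iff _).mp h))]
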